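-- pv_equiv track=rewrite | github.com/animeshokhade/dsa | scaler/Replicating Substring.py | solve
-- ===== SOURCE A (Python) =====
-- from collections import Counter
--
-- def solve(A, B):
--     if A == 1:
--         return 1
--
--     if A > len(B):
--         return -1
--
--     freq = Counter(B)
--
--     for key, val in freq.items():
--         if val % A != 0:
--             return -1
--
--     return 1
-- ===== SOURCE B (Python) =====
-- def solve(A, B):
--     if A == 1:
--         return 1
--     if A > len(B):
--         return -1
--     s = sorted(B)
--     i = 0
--     n = len(s)
--     while i < n:
--         j = i + 1
--         while j < n and s[j] == s[i]:
--             j += 1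
--         if (j - i) % A != 0:
--             return -1
--         i = j
--     return 1
-- ===== Notes on version B (the rewrite author's own statement) =====
-- stated objective: alternative
-- what changed: Replaces the Counter frequency map with sort-then-scan: B is sorted and each maximal run of equal characters is length-checked in place, so no dictionary is ever built.
import Mathlib
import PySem

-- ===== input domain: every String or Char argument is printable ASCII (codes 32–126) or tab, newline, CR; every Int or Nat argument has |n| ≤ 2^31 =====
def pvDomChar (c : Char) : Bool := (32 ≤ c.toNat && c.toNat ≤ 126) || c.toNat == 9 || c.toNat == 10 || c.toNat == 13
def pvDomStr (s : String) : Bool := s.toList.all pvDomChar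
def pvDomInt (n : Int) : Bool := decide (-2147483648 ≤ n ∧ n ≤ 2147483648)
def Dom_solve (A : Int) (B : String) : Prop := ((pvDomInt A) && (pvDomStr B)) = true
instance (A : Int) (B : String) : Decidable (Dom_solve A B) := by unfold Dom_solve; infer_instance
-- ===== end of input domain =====

-- B replaces the Counter frequency map with sort-then-scan over maximal runs (alternative algorithm, same results).

-- ===== PORT A =====
-- 'for key, val in freq.items(): if val % A != 0: return -1' then 'return 1'
def solveItemsLoop (A : Int) : List (Char × Int) → Int
  | [] => 1
  | (_, v) :: rest => if PySem.Int.mod v A ≠ 0 then -1 else solveItemsLoop A rest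

def solve (A : Int) (B : String) : Int :=
  if A = 1 then 1
  else if A > PySem.Str.len B then -1
  else
    let freq := PySem.Dict.counter B.toList
    solveItemsLoop A freq.items

-- ===== PORT B =====
-- the outer while over i: split off the leading run s[i..j) (the inner while = takeWhile), check its length, continue at j
def solveRunLoop (A : Int) : List Char → Int
  | [] => 1
  | c :: rest =>
    if PySem.Int.mod (1 + ((rest.takeWhile (· == c)).length : Int)) A ≠ 0 then -1
    else solveRunLoop A (rest.dropWhile (· == c))
  termination_by s => s.length
  decreasing_by simpa using Nat.lt_succ_of_le (List.length_dropWhile_le _ _)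

def solve_alt (A : Int) (B : String) : Int :=
  if A = 1 then 1
  else if A > PySem.Str.len B then -1
  else solveRunLoop A (PySem.List.sorted B.toList (fun x => x) false)

-- ===== PRECONDITION & SPEC =====
-- Pre_ excludes exactly the inputs where Python A raises ZeroDivisionError (A == 0 with nonempty B; B raises there too).
def Pre_solve (A : Int) (B : String) : Prop := A ≠ 0 ∨ B.toList = []
instance (A : Int) (B : String) : Decidable (Pre_solve A B) := by unfold Pre_solve; infer_instance
def pvWitness_solve : Int × String := (2, "aabb")
def Spec_solve (A : Int) (B : String) (out : Int) : Prop := out = solve_alt A B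
instance (A : Int) (B : String) (out : Int) : Decidable (Spec_solve A B out) := by unfold Spec_solve; infer_instance

-- ===== CLAIM (what is proved, stated in full; the proofs are below) =====
def Claim_equal_solve : Prop := ∀ (A : Int) (B : String), Dom_solve A B → Pre_solve A B → Spec_solve A B (solve A B)

-- ===== LEMMAS AND PROOFS =====

theorem runLoop_nil (A : Int) : solveRunLoop A [] = 1 := by
  rw [solveRunLoop.eq_def]

theorem runLoop_cons (A : Int) (c : Char) (rest : List Char) :
    solveRunLoop A (c :: rest) =
      if PySem.Int.mod (1 + ((rest.takeWhile (· == c)).length : Int)) A ≠ 0 then -1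
      else solveRunLoop A (rest.dropWhile (· == c)) := by
  rw [solveRunLoop.eq_def]

theorem itemsLoop_eq (A : Int) (l : List (Char × Int)) :
    solveItemsLoop A l = if ∀ p ∈ l, PySem.Int.mod p.2 A = 0 then 1 else -1 := by
  induction l with
  | nil => simp [solveItemsLoop]
  | cons p rest ih =>
    obtain ⟨k, v⟩ := p
    simp only [solveItemsLoop, ih, List.forall_mem_cons]
    by_cases h : PySem.Int.mod v A = 0
    · rw [if_neg (by simp [h])]
      by_cases hr : ∀ p ∈ rest, PySem.Int.mod p.2 A = 0
      · rw [if_pos hr, if_pos ⟨h, hr⟩]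
      · rw [if_neg hr, if_neg (fun hh => hr hh.2)]
    · rw [if_pos h, if_neg (fun hh => h hh.1)]

theorem runLoop_eq (A : Int) (s : List Char) (hs : s.Pairwise (· ≤ ·)) :
    solveRunLoop A s = if ∀ c ∈ s, PySem.Int.mod (s.count c : Int) A = 0 then 1 else -1 := by
  induction hn : s.length using Nat.strong_induction_on generalizing s with
  | _ n ih =>
  cases s with
  | nil => simp [runLoop_nil]
  | cons c rest =>
    set t := rest.takeWhile (· == c) with ht
    set d := rest.dropWhile (· == c) with hd
    have hsplit : t ++ d = rest := List.takeWhile_append_dropWhile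
    have htc : ∀ x ∈ t, x = c := by
      intro x hx
      have := List.mem_takeWhile_imp hx
      simpa using this
    have hdsub : d.Sublist rest := hd ▸ List.dropWhile_sublist _
    -- every element of d differs from c
    have hdne : ∀ x ∈ d, x ≠ c := by
      intro x hx
      have hrest : ∀ y ∈ rest, c ≤ y := (List.pairwise_cons.mp hs).1
      cases hdd : d with
      | nil => simp [hdd] at hx
      | cons e es =>
        have hehd : ¬ (e == c) = true := by
          have := List.head?_dropWhile_not (· == c) rest
          rw [← hd, hdd] at this; simpa using this
        have hec : c < e := by
          have hce : c ≤ e := hrest e (hdsub.subset (by simp [hdd]))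
          rcases lt_or_eq_of_le hce with hlt | heq
          · exact hlt
          · exact absurd (by simp [heq.symm]) hehd
        rw [hdd] at hx
        rcases List.mem_cons.mp hx with hxe | hxs
        · exact fun hc => absurd (by simp [hxe.symm.trans hc]) hehd
        · have hdp : d.Pairwise (· ≤ ·) := (List.pairwise_cons.mp hs).2.sublist hdsub
          rw [hdd] at hdp
          have hex : e ≤ x := (List.pairwise_cons.mp hdp).1 x hxs
          intro hc; rw [hc] at hex; exact absurd hex (not_le.mpr hec)
    have hcnt : (c :: rest).count c = 1 + t.length := by
      rw [← hsplit]
      have h1 : t.count c = t.length := by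
        rw [List.count_eq_length]; intro a ha; simp [htc a ha]
      have h2 : d.count c = 0 := by
        rw [List.count_eq_zero]; intro hc; exact hdne c hc rfl
      simp [List.count_append, h1, h2]; omega
    have hcntd : ∀ x ∈ d, (c :: rest).count x = d.count x := by
      intro x hx
      have hxc : x ≠ c := hdne x hx
      rw [← hsplit]
      have h1 : t.count x = 0 := by
        rw [List.count_eq_zero]; intro hc; exact hxc (htc x hc)
      simp [List.count_append, h1, Ne.symm hxc]
    have hdp : d.Pairwise (· ≤ ·) := (List.pairwise_cons.mp hs).2.sublist hdsub
    have hdl : d.length < n := by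
      have h1 : d.length ≤ rest.length := hdsub.length_le
      simp only [List.length_cons] at hn; omega
    have ihd := ih d.length hdl d hdp rfl
    rw [runLoop_cons, ← ht, ← hd]
    by_cases hrun : PySem.Int.mod (1 + (t.length : Int)) A = 0
    · simp only [hrun, ne_eq, not_true_eq_false, if_false]
      rw [ihd]
      have hiff : (∀ x ∈ d, PySem.Int.mod (d.count x : Int) A = 0)
          ↔ (∀ x ∈ (c :: rest), PySem.Int.mod ((c :: rest).count x : Int) A = 0) := by
        constructor
        · intro h x hx
          rcases List.mem_cons.mp hx with h1 | h1
          · subst h1; rw [hcnt]; exact_mod_cast hrun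
          · rw [← hsplit] at h1
            rcases List.mem_append.mp h1 with h2 | h2
            · rw [htc x h2, hcnt]; exact_mod_cast hrun
            · rw [hcntd x h2]; exact h x h2
        · intro h x hx
          rw [← hcntd x hx]
          exact h x (List.mem_cons_of_mem _ (hsplit ▸ List.mem_append_right _ hx))
      by_cases hall : ∀ x ∈ d, PySem.Int.mod (d.count x : Int) A = 0
      · rw [if_pos hall, if_pos (hiff.mp hall)]
      · rw [if_neg hall, if_neg (fun h => hall (hiff.mpr h))]
    · simp only [hrun, ne_eq, not_false_eq_true, if_true]
      rw [if_neg]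
      intro h
      have := h c List.mem_cons_self
      rw [hcnt] at this
      exact hrun (by exact_mod_cast this)

theorem forall_ofList (A : Int) (xs : List Char) :
    (∀ p ∈ (PySem.Set.ofList xs).map (fun k => (k, (xs.count k : Int))), PySem.Int.mod p.2 A = 0)
      ↔ (∀ c ∈ xs, PySem.Int.mod (xs.count c : Int) A = 0) := by
  constructor
  · intro h c hc
    exact h (c, (xs.count c : Int)) (List.mem_map.mpr ⟨c, (PySem.Set.mem_ofList _ _).mpr hc, rfl⟩)
  · intro h p hp
    rcases List.mem_map.mp hp with ⟨c, hc, rfl⟩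
    exact h c ((PySem.Set.mem_ofList _ _).mp hc)

-- ===== VERDICT (by name: the statement is the Claim_ definition above) =====
theorem solve_spec : Claim_equal_solve := by
  intro A B _ _
  unfold Spec_solve solve solve_alt
  split_ifs with h1 h2
  · rfl
  · rfl
  · show solveItemsLoop A (PySem.Dict.counter B.toList).items
        = solveRunLoop A (PySem.List.sorted B.toList (fun x => x) false)
    rw [PySem.Dict.items_counter, itemsLoop_eq,
      runLoop_eq A _ (by simpa using PySem.List.sorted_pairwise B.toList (fun x => x))]
    have hperm : (PySem.List.sorted B.toList (fun x => x) false).Perm B.toList :=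
      PySem.List.sorted_perm _ _ _
    have hiff : (∀ p ∈ (PySem.Set.ofList B.toList).map (fun k => (k, (B.toList.count k : Int))),
          PySem.Int.mod p.2 A = 0)
        ↔ (∀ c ∈ PySem.List.sorted B.toList (fun x => x) false,
          PySem.Int.mod ((PySem.List.sorted B.toList (fun x => x) false).count c : Int) A = 0) := by
      rw [forall_ofList]
      constructor
      · intro h c hc
        rw [hperm.count_eq]; exact h c (hperm.mem_iff.mp hc)
      · intro h c hc
        rw [← hperm.count_eq]; exact h c (hperm.mem_iff.mpr hc)
    by_cases hall : ∀ p ∈ (PySem.Set.ofList B.toList).map (fun k => (k, (B.toList.count k : Int))),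
        PySem.Int.mod p.2 A = 0
    · rw [if_pos hall, if_pos (hiff.mp hall)]
    · rw [if_neg hall, if_neg (fun h => hall (hiff.mpr h))]
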